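-- pv_equiv track=rewrite | github.com/axyzxyz/alyun_devops | api_Signature.py | tran_code
-- ===== SOURCE A (Python) =====
-- def tran_code(word):
--     """
--     根据阿里云签名规则，对签名字符串进行特定字符的转换
--     :param word:
--     :return:
--     """
--     trans = [('=', '%3D'),
--              ("+", "%20"),
--              ("%7E", "~"),
--              ('&', '%26'),
--              ('*', '%2A'),
--              ('%3A', '%253A'),
--              ]
--     words = word
--     for tran in trans:
--         words = words.replace(*tran)
--     return words
-- ===== SOURCE B (Python) =====
-- def tran_code(word):
--     """
--     Single left-to-right scan applying all six signature-encoding rewrites at once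
--     (the six sources never overlap and no rule's output re-triggers another rule,
--     so one simultaneous pass equals the six sequential .replace passes).
--     """
--     out = []
--     i = 0
--     n = len(word)
--     while i < n:
--         c = word[i]
--         if c == '%' and word[i + 1:i + 3] == '7E':
--             out.append('~')
--             i += 3
--         elif c == '%' and word[i + 1:i + 3] == '3A':
--             out.append('%253A')
--             i += 3
--         elif c == '=':
--             out.append('%3D')
--             i += 1
--         elif c == '+':
--             out.append('%20')
--             i += 1
--         elif c == '&':
--             out.append('%26')
--             i += 1
--         elif c == '*':
--             out.append('%2A')
--             i += 1
--         else:
--             out.append(c)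
--             i += 1
--     return ''.join(out)
-- ===== Notes on version B (the rewrite author's own statement) =====
-- stated objective: alternative
-- what changed: Replaces six sequential full-string .replace passes by one left-to-right scan that applies all six rewrite rules simultaneously (valid because the six source tokens never overlap and no rule's output re-triggers another rule).
import Mathlib
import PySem

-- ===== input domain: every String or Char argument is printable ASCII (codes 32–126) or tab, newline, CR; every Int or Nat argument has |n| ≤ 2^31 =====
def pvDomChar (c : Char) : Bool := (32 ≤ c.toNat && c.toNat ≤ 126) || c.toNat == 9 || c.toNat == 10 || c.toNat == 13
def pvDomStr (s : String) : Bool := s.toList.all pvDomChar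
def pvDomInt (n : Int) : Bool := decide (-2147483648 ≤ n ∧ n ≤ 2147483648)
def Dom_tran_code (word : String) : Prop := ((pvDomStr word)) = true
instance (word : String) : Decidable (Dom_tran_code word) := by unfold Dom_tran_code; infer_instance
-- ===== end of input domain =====

-- B replaces A's six sequential .replace passes by one simultaneous left-to-right scan (alternative decomposition, same result).

-- ===== PORT A =====
def tran_code (word : String) : String :=
  let trans : List (String × String) :=
    [("=", "%3D"), ("+", "%20"), ("%7E", "~"), ("&", "%26"), ("*", "%2A"), ("%3A", "%253A")]
  trans.foldl (fun words tran => PySem.Str.replace words tran.1 tran.2) word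

-- ===== PORT B =====
-- one pass over the characters; `t.take 2 = […]` mirrors Source B's `word[i+1:i+3] == '7E'` slice test
def tcScan : List Char → List Char
  | [] => []
  | c :: t =>
    if c = '%' ∧ t.take 2 = ['7', 'E'] then '~' :: tcScan (t.drop 2)
    else if c = '%' ∧ t.take 2 = ['3', 'A'] then '%' :: '2' :: '5' :: '3' :: 'A' :: tcScan (t.drop 2)
    else if c = '=' then '%' :: '3' :: 'D' :: tcScan t
    else if c = '+' then '%' :: '2' :: '0' :: tcScan t
    else if c = '&' then '%' :: '2' :: '6' :: tcScan t
    else if c = '*' then '%' :: '2' :: 'A' :: tcScan t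
    else c :: tcScan t
termination_by l => l.length
decreasing_by all_goals simp

def tran_code_alt (word : String) : String := String.ofList (tcScan word.toList)

-- ===== PRECONDITION & SPEC =====
def Spec_tran_code (word : String) (out : String) : Prop := out = tran_code_alt word
instance (word : String) (out : String) : Decidable (Spec_tran_code word out) := by unfold Spec_tran_code; infer_instance

-- ===== CLAIM (what is proved, stated in full; the proofs are below) =====
def Claim_equal_tran_code : Prop := ∀ (word : String), Dom_tran_code word → Spec_tran_code word (tran_code word)

-- ===== LEMMAS AND PROOFS =====

-- fuel-free characterisation of PySem.Chars.replace (for nonempty `o`)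
def tcRep (o n : List Char) : List Char → List Char
  | [] => []
  | c :: t =>
    if (c :: t).take o.length = o then n ++ tcRep o n (t.drop (o.length - 1))
    else c :: tcRep o n t
termination_by l => l.length
decreasing_by all_goals simp

lemma tcGo_eq (o n : List Char) (ho : o ≠ []) :
    ∀ (fuel : Nat) (l acc : List Char), l.length ≤ fuel →
      PySem.Chars.replace.go o n fuel l acc = acc.reverse ++ tcRep o n l := by
  intro fuel
  induction fuel with
  | zero =>
    intro l acc h
    have hl : l = [] := by cases l <;> simp_all
    subst hl
    simp [PySem.Chars.replace.go, tcRep]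
  | succ f ih =>
    intro l acc h
    cases l with
    | nil => simp [PySem.Chars.replace.go, tcRep]
    | cons c t =>
      obtain ⟨d, m, rfl⟩ : ∃ d m, o = d :: m := by
        cases o with
        | nil => exact absurd rfl ho
        | cons d m => exact ⟨d, m, rfl⟩
      simp only [PySem.Chars.replace.go]
      by_cases hp : (d :: m).isPrefixOf (c :: t)
      · rw [if_pos hp]
        have hdrop : List.drop (d :: m).length (c :: t) = t.drop m.length := by simp
        have hlen : (List.drop (d :: m).length (c :: t)).length ≤ f := by
          simp at h ⊢; omega
        rw [ih _ _ hlen, hdrop]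
        have htake : (c :: t).take (d :: m).length = d :: m := by
          have := (List.prefix_iff_eq_take).1 (List.isPrefixOf_iff_prefix.1 hp)
          exact this.symm
        rw [tcRep]; rw [if_pos htake]
        simp
      · rw [if_neg hp]
        have hlen : t.length ≤ f := by simp at h; omega
        rw [ih _ _ hlen]
        have htake : ¬ (c :: t).take (d :: m).length = d :: m := by
          intro hcon
          exact hp (List.isPrefixOf_iff_prefix.2 (List.prefix_iff_eq_take.2 hcon.symm))
        rw [tcRep]; rw [if_neg htake]
        simp

lemma replace_eq (s o n : List Char) (ho : o ≠ []) :
    PySem.Chars.replace s o n = tcRep o n s := by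
  rw [PySem.Chars.replace]
  rw [if_neg (by simpa [List.isEmpty_iff] using ho)]
  simpa using tcGo_eq o n ho s.length s [] le_rfl

-- `o` does not match here, so the head character passes through
lemma tcRep_pass (d : Char) (m n : List Char) (c : Char) (t : List Char) (h : c ≠ d) :
    tcRep (d :: m) n (c :: t) = c :: tcRep (d :: m) n t := by
  simp only [tcRep]
  rw [if_neg]
  intro hcon
  simp at hcon
  exact h hcon.1

-- a rewrite pass whose source and replacement both avoid `a`/`b` at the head never creates an `[a,b]` start
lemma tcRep_resp (od : Char) (om : List Char) (nd : Char) (nm : List Char) (a b : Char)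
    (hoa : od ≠ a) (hna : nd ≠ a) (hnb : nd ≠ b) :
    ∀ t, (tcRep (od :: om) (nd :: nm) t).take 2 = [a, b] → t.take 2 = [a, b] := by
  intro t h
  cases t with
  | nil => simp [tcRep] at h
  | cons c u =>
    simp only [tcRep] at h
    by_cases hm : (c :: u).take (od :: om).length = od :: om
    · rw [if_pos hm] at h
      simp at h
      exact absurd h.1 hna
    · rw [if_neg hm] at h
      simp at h
      obtain ⟨rfl, h2⟩ := h
      cases u with
      | nil => simp [tcRep] at h2
      | cons e v =>
        simp only [tcRep] at h2
        by_cases hm2 : (e :: v).take (od :: om).length = od :: om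
        · rw [if_pos hm2] at h2
          simp at h2
          exact absurd h2 hnb
        · rw [if_neg hm2] at h2
          simp at h2
          simp [h2]

lemma take_two_eq (t : List Char) (a b : Char) (h : t.take 2 = [a, b]) :
    ∃ u, t = a :: b :: u := by
  cases t with
  | nil => simp at h
  | cons d t' =>
    cases t' with
    | nil => simp at h
    | cons e u =>
      simp at h
      obtain ⟨rfl, rfl⟩ := h
      exact ⟨u, rfl⟩

-- the two three-character rules pass '%' through when the next two characters do not complete the source
lemma tcRep_head_pass3 (x y : Char) (n : List Char) (X : List Char) (hX : ¬ X.take 2 = [x, y]) :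
    tcRep ['%', x, y] n ('%' :: X) = '%' :: tcRep ['%', x, y] n X := by
  simp only [tcRep]
  rw [if_neg]
  intro hcon
  apply hX
  simpa [List.take_succ_cons] using hcon

def tcComp (l : List Char) : List Char :=
  tcRep ['%', '3', 'A'] ['%', '2', '5', '3', 'A']
    (tcRep ['*'] ['%', '2', 'A']
      (tcRep ['&'] ['%', '2', '6']
        (tcRep ['%', '7', 'E'] ['~']
          (tcRep ['+'] ['%', '2', '0']
            (tcRep ['='] ['%', '3', 'D'] l)))))

lemma tcRep_match1 (d : Char) (n : List Char) (t : List Char) :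
    tcRep [d] n (d :: t) = n ++ tcRep [d] n t := by
  rw [tcRep]
  rw [if_pos (by simp)]
  simp

lemma tcRep_match3 (x y : Char) (n : List Char) (t : List Char) :
    tcRep ['%', x, y] n ('%' :: x :: y :: t) = n ++ tcRep ['%', x, y] n t := by
  rw [tcRep]
  rw [if_pos (by simp)]
  simp

lemma comp_eq_scan : ∀ (N : Nat) (l : List Char), l.length ≤ N → tcComp l = tcScan l := by
  intro N
  induction N with
  | zero =>
    intro l h
    have hl : l = [] := by cases l <;> simp_all
    subst hl
    simp [tcComp, tcRep, tcScan]
  | succ N ih =>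
    intro l h
    cases l with
    | nil => simp [tcComp, tcRep, tcScan]
    | cons c t =>
      have ht : t.length ≤ N := by simp at h; omega
      by_cases hc1 : c = '='
      · subst hc1
        simp only [tcComp]
        rw [tcRep_match1 '=' ['%', '3', 'D'] t]
        simp only [List.cons_append, List.nil_append]
        rw [tcRep_pass '+' [] ['%', '2', '0'] '%' _ (by decide)]
        rw [tcRep_pass '+' [] ['%', '2', '0'] '3' _ (by decide)]
        rw [tcRep_pass '+' [] ['%', '2', '0'] 'D' _ (by decide)]
        rw [tcRep_head_pass3 '7' 'E' ['~'] _ (by simp)]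
        rw [tcRep_pass '%' ['7', 'E'] ['~'] '3' _ (by decide)]
        rw [tcRep_pass '%' ['7', 'E'] ['~'] 'D' _ (by decide)]
        rw [tcRep_pass '&' [] ['%', '2', '6'] '%' _ (by decide)]
        rw [tcRep_pass '&' [] ['%', '2', '6'] '3' _ (by decide)]
        rw [tcRep_pass '&' [] ['%', '2', '6'] 'D' _ (by decide)]
        rw [tcRep_pass '*' [] ['%', '2', 'A'] '%' _ (by decide)]
        rw [tcRep_pass '*' [] ['%', '2', 'A'] '3' _ (by decide)]
        rw [tcRep_pass '*' [] ['%', '2', 'A'] 'D' _ (by decide)]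
        rw [tcRep_head_pass3 '3' 'A' ['%', '2', '5', '3', 'A'] _ (by simp)]
        rw [tcRep_pass '%' ['3', 'A'] ['%', '2', '5', '3', 'A'] '3' _ (by decide)]
        rw [tcRep_pass '%' ['3', 'A'] ['%', '2', '5', '3', 'A'] 'D' _ (by decide)]
        have hscan : tcScan ('=' :: t) = '%' :: '3' :: 'D' :: tcScan t := by
          rw [tcScan]
          rw [if_neg (by simp), if_neg (by simp), if_pos rfl]
        rw [hscan]
        show '%' :: '3' :: 'D' :: tcComp t = _
        rw [ih t ht]
      · by_cases hc2 : c = '+'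
        · subst hc2
          simp only [tcComp]
          rw [tcRep_pass '=' [] ['%', '3', 'D'] '+' t (by decide)]
          rw [tcRep_match1 '+' ['%', '2', '0'] _]
          simp only [List.cons_append, List.nil_append]
          rw [tcRep_head_pass3 '7' 'E' ['~'] _ (by simp)]
          rw [tcRep_pass '%' ['7', 'E'] ['~'] '2' _ (by decide)]
          rw [tcRep_pass '%' ['7', 'E'] ['~'] '0' _ (by decide)]
          rw [tcRep_pass '&' [] ['%', '2', '6'] '%' _ (by decide)]
          rw [tcRep_pass '&' [] ['%', '2', '6'] '2' _ (by decide)]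
          rw [tcRep_pass '&' [] ['%', '2', '6'] '0' _ (by decide)]
          rw [tcRep_pass '*' [] ['%', '2', 'A'] '%' _ (by decide)]
          rw [tcRep_pass '*' [] ['%', '2', 'A'] '2' _ (by decide)]
          rw [tcRep_pass '*' [] ['%', '2', 'A'] '0' _ (by decide)]
          rw [tcRep_head_pass3 '3' 'A' ['%', '2', '5', '3', 'A'] _ (by simp)]
          rw [tcRep_pass '%' ['3', 'A'] ['%', '2', '5', '3', 'A'] '2' _ (by decide)]
          rw [tcRep_pass '%' ['3', 'A'] ['%', '2', '5', '3', 'A'] '0' _ (by decide)]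
          have hscan : tcScan ('+' :: t) = '%' :: '2' :: '0' :: tcScan t := by
            rw [tcScan]
            rw [if_neg (by simp), if_neg (by simp), if_neg (by decide), if_pos rfl]
          rw [hscan]
          show '%' :: '2' :: '0' :: tcComp t = _
          rw [ih t ht]
        · by_cases hc3 : c = '&'
          · subst hc3
            simp only [tcComp]
            rw [tcRep_pass '=' [] ['%', '3', 'D'] '&' t (by decide)]
            rw [tcRep_pass '+' [] ['%', '2', '0'] '&' _ (by decide)]
            rw [tcRep_pass '%' ['7', 'E'] ['~'] '&' _ (by decide)]
            rw [tcRep_match1 '&' ['%', '2', '6'] _]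
            simp only [List.cons_append, List.nil_append]
            rw [tcRep_pass '*' [] ['%', '2', 'A'] '%' _ (by decide)]
            rw [tcRep_pass '*' [] ['%', '2', 'A'] '2' _ (by decide)]
            rw [tcRep_pass '*' [] ['%', '2', 'A'] '6' _ (by decide)]
            rw [tcRep_head_pass3 '3' 'A' ['%', '2', '5', '3', 'A'] _ (by simp)]
            rw [tcRep_pass '%' ['3', 'A'] ['%', '2', '5', '3', 'A'] '2' _ (by decide)]
            rw [tcRep_pass '%' ['3', 'A'] ['%', '2', '5', '3', 'A'] '6' _ (by decide)]
            have hscan : tcScan ('&' :: t) = '%' :: '2' :: '6' :: tcScan t := by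
              rw [tcScan]
              rw [if_neg (by simp), if_neg (by simp), if_neg (by decide), if_neg (by decide), if_pos rfl]
            rw [hscan]
            show '%' :: '2' :: '6' :: tcComp t = _
            rw [ih t ht]
          · by_cases hc4 : c = '*'
            · subst hc4
              simp only [tcComp]
              rw [tcRep_pass '=' [] ['%', '3', 'D'] '*' t (by decide)]
              rw [tcRep_pass '+' [] ['%', '2', '0'] '*' _ (by decide)]
              rw [tcRep_pass '%' ['7', 'E'] ['~'] '*' _ (by decide)]
              rw [tcRep_pass '&' [] ['%', '2', '6'] '*' _ (by decide)]
              rw [tcRep_match1 '*' ['%', '2', 'A'] _]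
              simp only [List.cons_append, List.nil_append]
              rw [tcRep_head_pass3 '3' 'A' ['%', '2', '5', '3', 'A'] _ (by simp)]
              rw [tcRep_pass '%' ['3', 'A'] ['%', '2', '5', '3', 'A'] '2' _ (by decide)]
              rw [tcRep_pass '%' ['3', 'A'] ['%', '2', '5', '3', 'A'] 'A' _ (by decide)]
              have hscan : tcScan ('*' :: t) = '%' :: '2' :: 'A' :: tcScan t := by
                rw [tcScan]
                rw [if_neg (by simp), if_neg (by simp), if_neg (by decide), if_neg (by decide),
                    if_neg (by decide), if_pos rfl]
              rw [hscan]
              show '%' :: '2' :: 'A' :: tcComp t = _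
              rw [ih t ht]
            · by_cases hc5 : c = '%'
              · subst hc5
                by_cases h7 : t.take 2 = ['7', 'E']
                · obtain ⟨u, rfl⟩ := take_two_eq t '7' 'E' h7
                  have hu : u.length ≤ N := by simp at h; omega
                  simp only [tcComp]
                  rw [tcRep_pass '=' [] ['%', '3', 'D'] '%' _ (by decide)]
                  rw [tcRep_pass '=' [] ['%', '3', 'D'] '7' _ (by decide)]
                  rw [tcRep_pass '=' [] ['%', '3', 'D'] 'E' _ (by decide)]
                  rw [tcRep_pass '+' [] ['%', '2', '0'] '%' _ (by decide)]
                  rw [tcRep_pass '+' [] ['%', '2', '0'] '7' _ (by decide)]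
                  rw [tcRep_pass '+' [] ['%', '2', '0'] 'E' _ (by decide)]
                  rw [tcRep_match3 '7' 'E' ['~'] _]
                  simp only [List.cons_append, List.nil_append]
                  rw [tcRep_pass '&' [] ['%', '2', '6'] '~' _ (by decide)]
                  rw [tcRep_pass '*' [] ['%', '2', 'A'] '~' _ (by decide)]
                  rw [tcRep_pass '%' ['3', 'A'] ['%', '2', '5', '3', 'A'] '~' _ (by decide)]
                  have hscan : tcScan ('%' :: '7' :: 'E' :: u) = '~' :: tcScan u := by
                    rw [tcScan]
                    rw [if_pos (by simp)]
                    simp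
                  rw [hscan]
                  show '~' :: tcComp u = _
                  rw [ih u hu]
                · by_cases h3 : t.take 2 = ['3', 'A']
                  · obtain ⟨u, rfl⟩ := take_two_eq t '3' 'A' h3
                    have hu : u.length ≤ N := by simp at h; omega
                    simp only [tcComp]
                    rw [tcRep_pass '=' [] ['%', '3', 'D'] '%' _ (by decide)]
                    rw [tcRep_pass '=' [] ['%', '3', 'D'] '3' _ (by decide)]
                    rw [tcRep_pass '=' [] ['%', '3', 'D'] 'A' _ (by decide)]
                    rw [tcRep_pass '+' [] ['%', '2', '0'] '%' _ (by decide)]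
                    rw [tcRep_pass '+' [] ['%', '2', '0'] '3' _ (by decide)]
                    rw [tcRep_pass '+' [] ['%', '2', '0'] 'A' _ (by decide)]
                    rw [tcRep_head_pass3 '7' 'E' ['~'] _ (by simp)]
                    rw [tcRep_pass '%' ['7', 'E'] ['~'] '3' _ (by decide)]
                    rw [tcRep_pass '%' ['7', 'E'] ['~'] 'A' _ (by decide)]
                    rw [tcRep_pass '&' [] ['%', '2', '6'] '%' _ (by decide)]
                    rw [tcRep_pass '&' [] ['%', '2', '6'] '3' _ (by decide)]
                    rw [tcRep_pass '&' [] ['%', '2', '6'] 'A' _ (by decide)]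
                    rw [tcRep_pass '*' [] ['%', '2', 'A'] '%' _ (by decide)]
                    rw [tcRep_pass '*' [] ['%', '2', 'A'] '3' _ (by decide)]
                    rw [tcRep_pass '*' [] ['%', '2', 'A'] 'A' _ (by decide)]
                    rw [tcRep_match3 '3' 'A' ['%', '2', '5', '3', 'A'] _]
                    simp only [List.cons_append, List.nil_append]
                    have hscan : tcScan ('%' :: '3' :: 'A' :: u) =
                        '%' :: '2' :: '5' :: '3' :: 'A' :: tcScan u := by
                      rw [tcScan]
                      rw [if_neg (by simp), if_pos (by simp)]
                      simp
                    rw [hscan]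
                    show '%' :: '2' :: '5' :: '3' :: 'A' :: tcComp u = _
                    rw [ih u hu]
                  · -- generic '%': no rule fires at this position
                    have f7 : ¬ (tcRep ['+'] ['%', '2', '0'] (tcRep ['='] ['%', '3', 'D'] t)).take 2 = ['7', 'E'] := by
                      intro hh
                      exact h7 (tcRep_resp '=' [] '%' ['3', 'D'] '7' 'E' (by decide) (by decide) (by decide) _
                        (tcRep_resp '+' [] '%' ['2', '0'] '7' 'E' (by decide) (by decide) (by decide) _ hh))
                    have f3 : ¬ (tcRep ['*'] ['%', '2', 'A'] (tcRep ['&'] ['%', '2', '6']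
                        (tcRep ['%', '7', 'E'] ['~'] (tcRep ['+'] ['%', '2', '0'] (tcRep ['='] ['%', '3', 'D'] t))))).take 2 = ['3', 'A'] := by
                      intro hh
                      exact h3 (tcRep_resp '=' [] '%' ['3', 'D'] '3' 'A' (by decide) (by decide) (by decide) _
                        (tcRep_resp '+' [] '%' ['2', '0'] '3' 'A' (by decide) (by decide) (by decide) _
                          (tcRep_resp '%' ['7', 'E'] '~' [] '3' 'A' (by decide) (by decide) (by decide) _
                            (tcRep_resp '&' [] '%' ['2', '6'] '3' 'A' (by decide) (by decide) (by decide) _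
                              (tcRep_resp '*' [] '%' ['2', 'A'] '3' 'A' (by decide) (by decide) (by decide) _ hh)))))
                    simp only [tcComp]
                    rw [tcRep_pass '=' [] ['%', '3', 'D'] '%' t (by decide)]
                    rw [tcRep_pass '+' [] ['%', '2', '0'] '%' _ (by decide)]
                    rw [tcRep_head_pass3 '7' 'E' ['~'] _ f7]
                    rw [tcRep_pass '&' [] ['%', '2', '6'] '%' _ (by decide)]
                    rw [tcRep_pass '*' [] ['%', '2', 'A'] '%' _ (by decide)]
                    rw [tcRep_head_pass3 '3' 'A' ['%', '2', '5', '3', 'A'] _ f3]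
                    have hscan : tcScan ('%' :: t) = '%' :: tcScan t := by
                      rw [tcScan]
                      rw [if_neg (by simp [h7]), if_neg (by simp [h3]),
                          if_neg (by decide), if_neg (by decide), if_neg (by decide), if_neg (by decide)]
                    rw [hscan]
                    show '%' :: tcComp t = '%' :: tcScan t
                    rw [ih t ht]
              · -- generic character: every rule passes it through
                simp only [tcComp]
                rw [tcRep_pass '=' [] ['%', '3', 'D'] c t hc1]
                rw [tcRep_pass '+' [] ['%', '2', '0'] c _ hc2]
                rw [tcRep_pass '%' ['7', 'E'] ['~'] c _ hc5]
                rw [tcRep_pass '&' [] ['%', '2', '6'] c _ hc3]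
                rw [tcRep_pass '*' [] ['%', '2', 'A'] c _ hc4]
                rw [tcRep_pass '%' ['3', 'A'] ['%', '2', '5', '3', 'A'] c _ hc5]
                have hscan : tcScan (c :: t) = c :: tcScan t := by
                  rw [tcScan]
                  rw [if_neg (by simp [hc5]), if_neg (by simp [hc5]),
                      if_neg (by simp [hc1]), if_neg (by simp [hc2]), if_neg (by simp [hc3]), if_neg (by simp [hc4])]
                rw [hscan]
                show c :: tcComp t = c :: tcScan t
                rw [ih t ht]

theorem String_toList_inj' (s t : String) (h : s.toList = t.toList) : s = t :=
  String.toList_inj.mp h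

-- ===== VERDICT (by name: the statement is the Claim_ definition above) =====
theorem tran_code_spec : Claim_equal_tran_code := by
  intro word _
  unfold Spec_tran_code
  apply String_toList_inj'
  have hA : (tran_code word).toList = tcComp word.toList := by
    simp only [tran_code, List.foldl, PySem.Str.toList_replace]
    rw [tcComp]
    rw [replace_eq _ _ _ (by decide), replace_eq _ _ _ (by decide), replace_eq _ _ _ (by decide),
        replace_eq _ _ _ (by decide), replace_eq _ _ _ (by decide), replace_eq _ _ _ (by decide)]
    rfl
  have hB : (tran_code_alt word).toList = tcScan word.toList := by
    simp [tran_code_alt]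
  rw [hA, hB, comp_eq_scan word.toList.length _ le_rfl]
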